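-- pv_equiv track=rewrite | github.com/MFry/pyAlgoDataStructures | hacker_rank/WoC_24/xor_matrix.py | fast_xor_row
-- ===== SOURCE A (Python) =====
-- from operator import xor
--
-- def fast_xor_row(row, depth):
--     partial_matrix = [row]
--     base2 = 1
--     c = depth
--     while c > 0:
--         if c % 2 == 1:
--             t = []
--             for i in range(len(row)):
--                 t.append(xor(partial_matrix[-1][i], partial_matrix[-1][(i + base2) % len(row)]))
--             partial_matrix.append(t)
--         base2 *= 2
--         c //= 2
--
--     return partial_matrix[-1]
-- ===== SOURCE B (Python) =====
-- def fast_xor_row(row, depth):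
--     n = len(row)
--     if n == 0:
--         return row
--     # mask[j] = coefficient mod 2 of the j-step rotation in the operator (I + shift)^depth,
--     # i.e. (1+x)^depth reduced mod x^n - 1 over GF(2), built by square-and-multiply on the mask.
--     mask = [1] + [0] * (n - 1)
--     s, d = 1 % n, depth
--     while d > 0:
--         if d % 2 == 1:
--             mask = [mask[j] ^ mask[(j - s) % n] for j in range(n)]
--         s = s * 2 % n
--         d //= 2
--     offs = [j for j in range(n) if mask[j]]
--     out = []
--     for i in range(n):
--         acc = 0
--         for j in offs:
--             acc ^= row[(i + j) % n]
--         out.append(acc)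
--     return out
-- ===== Notes on version B (the rewrite author's own statement) =====
-- stated objective: alternative
-- what changed: Instead of A's doubling loop that repeatedly XOR-shifts the row itself (appending intermediate rows to a matrix), B first computes the GF(2) coefficient mask of the whole operator ((1+x)^depth mod x^n-1, by square-and-multiply on the mask) and then applies that mask to the row once.
import Mathlib
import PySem

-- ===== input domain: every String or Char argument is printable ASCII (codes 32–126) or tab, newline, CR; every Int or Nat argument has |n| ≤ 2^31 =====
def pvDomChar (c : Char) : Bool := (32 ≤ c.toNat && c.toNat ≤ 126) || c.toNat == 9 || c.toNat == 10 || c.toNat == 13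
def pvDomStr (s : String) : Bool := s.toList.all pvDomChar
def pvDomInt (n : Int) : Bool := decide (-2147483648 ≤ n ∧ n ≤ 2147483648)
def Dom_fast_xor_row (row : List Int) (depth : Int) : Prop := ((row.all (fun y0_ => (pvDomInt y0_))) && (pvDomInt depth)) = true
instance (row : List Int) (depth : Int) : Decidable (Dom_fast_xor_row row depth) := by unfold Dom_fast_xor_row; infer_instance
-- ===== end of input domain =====

-- B is a different algorithm of similar cost: it first builds the GF(2) coefficient mask of the
-- whole operator ((1+x)^depth mod x^n-1, square-and-multiply on the mask) and applies it to the row once.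


-- ===== PORT A =====
-- A's while-loop as recursion on c; partial_matrix kept as a list, partial_matrix[-1]
-- read via pyGetD (that index is always valid: the matrix starts as [row] and only grows).
def fxrGo (row : List Int) (pm : List (List Int)) (base2 : Int) (c : Int) : List Int :=
  if h : 0 < c then
    let last := PySem.List.pyGetD pm (-1) []
    let pm' := if PySem.Int.mod c 2 = 1 then
        pm ++ [(PySem.List.pyRange 0 (row.length : Int) 1).foldl
          (fun t i => t ++ [PySem.Int.bxor (PySem.List.pyGetD last i 0)
            (PySem.List.pyGetD last (PySem.Int.mod (i + base2) (row.length : Int)) 0)]) []]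
      else pm
    fxrGo row pm' (base2 * 2) (PySem.Int.floordiv c 2)
  else
    PySem.List.pyGetD pm (-1) []
termination_by c.toNat
decreasing_by
  have h2 := PySem.Int.floordiv_eq_ediv_of_pos (a := c) (b := 2) (by norm_num)
  omega

def fast_xor_row (row : List Int) (depth : Int) : List Int :=
  fxrGo row [row] 1 depth

-- ===== PORT B =====
-- B's while-loop (square-and-multiply on the shift-coefficient mask), recursion on d
def fxrAltGo (n : Nat) (mask : List Int) (s : Int) (d : Int) : List Int :=
  if h : 0 < d then
    let mask' := if PySem.Int.mod d 2 = 1 then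
        (PySem.List.pyRange 0 (n : Int) 1).map (fun j =>
          PySem.Int.bxor (PySem.List.pyGetD mask j 0)
            (PySem.List.pyGetD mask (PySem.Int.mod (j - s) (n : Int)) 0))
      else mask
    fxrAltGo n mask' (PySem.Int.mod (s * 2) (n : Int)) (PySem.Int.floordiv d 2)
  else mask
termination_by d.toNat
decreasing_by
  have h2 := PySem.Int.floordiv_eq_ediv_of_pos (a := d) (b := 2) (by norm_num)
  omega

def fast_xor_row_alt (row : List Int) (depth : Int) : List Int :=
  let n := row.length
  if n = 0 then row
  else
    let mask := fxrAltGo n ((1 : Int) :: List.replicate (n - 1) 0) (PySem.Int.mod 1 (n : Int)) depth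
    let offs := (PySem.List.pyRange 0 (n : Int) 1).filter (fun j => PySem.List.pyGetD mask j 0 != 0)
    (PySem.List.pyRange 0 (n : Int) 1).map (fun i =>
      offs.foldl (fun acc j =>
        PySem.Int.bxor acc (PySem.List.pyGetD row (PySem.Int.mod (i + j) (n : Int)) 0)) 0)

-- ===== PRECONDITION & SPEC =====
def Spec_fast_xor_row (row : List Int) (depth : Int) (out : List Int) : Prop := out = fast_xor_row_alt row depth
instance (row : List Int) (depth : Int) (out : List Int) : Decidable (Spec_fast_xor_row row depth out) := by unfold Spec_fast_xor_row; infer_instance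

-- ===== CLAIM (what is proved, stated in full; the proofs are below) =====
def Claim_equal_fast_xor_row : Prop := ∀ (row : List Int) (depth : Int), Dom_fast_xor_row row depth → Spec_fast_xor_row row depth (fast_xor_row row depth)

-- ===== LEMMAS AND PROOFS =====

-- Two's-complement decomposition of an Int: sign flag plus magnitude bits.
def pvDec (s : Bool) (m : Nat) : Int := if s then -(m : Int) - 1 else (m : Int)

theorem pvBxor_dec (s₁ s₂ : Bool) (m₁ m₂ : Nat) :
    PySem.Int.bxor (pvDec s₁ m₁) (pvDec s₂ m₂) = pvDec (s₁ ^^ s₂) (m₁ ^^^ m₂) := by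
  have hc : ∀ m : Nat, ¬ (1 : Int) ≤ -(m : Int) := by intro m; omega
  cases s₁ <;> cases s₂ <;> simp [pvDec, PySem.Int.bxor, hc]

theorem pvDec_repr (a : Int) : ∃ s m, a = pvDec s m := by
  rcases a with m | m
  · exact ⟨false, m, rfl⟩
  · exact ⟨true, m, by simp [pvDec, Int.negSucc_eq]; ring⟩

theorem pvBxor4 (a b c : Int) :
    PySem.Int.bxor (PySem.Int.bxor a b) (PySem.Int.bxor b c) = PySem.Int.bxor a c := by
  obtain ⟨sa, ma, rfl⟩ := pvDec_repr a
  obtain ⟨sb, mb, rfl⟩ := pvDec_repr b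
  obtain ⟨sc, mc, rfl⟩ := pvDec_repr c
  rw [pvBxor_dec, pvBxor_dec, pvBxor_dec, pvBxor_dec]
  have h1 : ((sa ^^ sb) ^^ (sb ^^ sc)) = (sa ^^ sc) := by
    cases sa <;> cases sb <;> cases sc <;> rfl
  have h2 : ((ma ^^^ mb) ^^^ (mb ^^^ mc)) = (ma ^^^ mc) := by
    rw [Nat.xor_assoc, ← Nat.xor_assoc mb mb mc, Nat.xor_self, Nat.zero_xor]
  rw [h1, h2]

theorem pvBxor_assoc (a b c : Int) :
    PySem.Int.bxor (PySem.Int.bxor a b) c = PySem.Int.bxor a (PySem.Int.bxor b c) := by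
  obtain ⟨sa, ma, rfl⟩ := pvDec_repr a
  obtain ⟨sb, mb, rfl⟩ := pvDec_repr b
  obtain ⟨sc, mc, rfl⟩ := pvDec_repr c
  rw [pvBxor_dec, pvBxor_dec, pvBxor_dec, pvBxor_dec]
  have h1 : ((sa ^^ sb) ^^ sc) = (sa ^^ (sb ^^ sc)) := by
    cases sa <;> cases sb <;> cases sc <;> rfl
  rw [h1, Nat.xor_assoc]

theorem pvZero_bxor (a : Int) : PySem.Int.bxor 0 a = a := by
  rw [PySem.Int.bxor_comm, PySem.Int.bxor_zero]

-- xor-sum of f over a list of indices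
def xsum (l : List Nat) (f : Nat → Int) : Int :=
  l.foldl (fun acc j => PySem.Int.bxor acc (f j)) 0

theorem xsum_from (l : List Nat) (f : Nat → Int) :
    ∀ acc : Int, l.foldl (fun acc j => PySem.Int.bxor acc (f j)) acc
      = PySem.Int.bxor acc (xsum l f) := by
  induction l with
  | nil => intro acc; simp [xsum, PySem.Int.bxor_zero]
  | cons a l ih =>
    intro acc
    have hx : xsum (a :: l) f = PySem.Int.bxor (f a) (xsum l f) := by
      rw [xsum, List.foldl_cons, ih, pvZero_bxor]
    rw [List.foldl_cons, ih, hx, pvBxor_assoc]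

theorem xsum_cons (a : Nat) (l : List Nat) (f : Nat → Int) :
    xsum (a :: l) f = PySem.Int.bxor (f a) (xsum l f) := by
  rw [xsum, List.foldl_cons, xsum_from, pvZero_bxor]

theorem xsum_congr (l : List Nat) (f g : Nat → Int) (h : ∀ j ∈ l, f j = g j) :
    xsum l f = xsum l g := by
  induction l with
  | nil => rfl
  | cons a l ih =>
    rw [xsum_cons, xsum_cons, h a (by simp), ih (fun j hj => h j (by simp [hj]))]

theorem xsum_split (l : List Nat) (f g : Nat → Int) :
    xsum l (fun j => PySem.Int.bxor (f j) (g j))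
      = PySem.Int.bxor (xsum l f) (xsum l g) := by
  induction l with
  | nil => simp [xsum]
  | cons a l ih =>
    rw [xsum_cons, xsum_cons, xsum_cons, ih]
    rw [pvBxor_assoc, pvBxor_assoc]
    congr 1
    rw [← pvBxor_assoc, ← pvBxor_assoc, PySem.Int.bxor_comm (g a)]

theorem xsum_perm (l l' : List Nat) (h : l.Perm l') (f : Nat → Int) :
    xsum l f = xsum l' f := by
  induction h with
  | nil => rfl
  | cons a _ ih => rw [xsum_cons, xsum_cons, ih]
  | swap a b l =>
    rw [xsum_cons, xsum_cons, xsum_cons, xsum_cons,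
      ← pvBxor_assoc, ← pvBxor_assoc, PySem.Int.bxor_comm (f b)]
  | trans _ _ ih1 ih2 => rw [ih1, ih2]

theorem xsum_map (l : List Nat) (g : Nat → Nat) (f : Nat → Int) :
    xsum (l.map g) f = xsum l (fun j => f (g j)) := by
  rw [xsum, List.foldl_map]; rfl

theorem xsum_filter (l : List Nat) (p : Nat → Bool) (f : Nat → Int) :
    xsum (l.filter p) f = xsum l (fun j => if p j then f j else 0) := by
  induction l with
  | nil => rfl
  | cons a l ih =>
    by_cases hp : p a
    · rw [List.filter_cons_of_pos hp, xsum_cons, xsum_cons, ih, if_pos hp]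
    · rw [List.filter_cons_of_neg hp, xsum_cons, ih, if_neg hp, pvZero_bxor]

theorem xsum_zero (f : Nat → Int) :
    ∀ l : List Nat, (∀ j ∈ l, f j = 0) → xsum l f = 0 := by
  intro l
  induction l with
  | nil => intro _; rfl
  | cons a l ih =>
    intro h
    rw [xsum_cons, h a (by simp), pvZero_bxor]
    exact ih (fun j hj => h j (by simp [hj]))

theorem xsum_single (f : Nat → Int) (j0 : Nat) :
    ∀ l : List Nat, l.Nodup → j0 ∈ l → (∀ j ∈ l, j ≠ j0 → f j = 0) → xsum l f = f j0 := by
  intro l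
  induction l with
  | nil => intro _ h; simp at h
  | cons a l ih =>
    intro hnd hmem hz
    rcases List.mem_cons.mp hmem with rfl | hmem'
    · rw [xsum_cons]
      have : ∀ j ∈ l, f j = 0 := by
        intro j hj
        exact hz j (by simp [hj]) (fun he => (List.nodup_cons.mp hnd).1 (he ▸ hj))
      rw [xsum_zero f l this, PySem.Int.bxor_zero]
    · rw [xsum_cons, hz a (by simp) (fun he => by subst he; exact (List.nodup_cons.mp hnd).1 hmem'),
        pvZero_bxor]
      exact ih (List.nodup_cons.mp hnd).2 hmem' (fun j hj => hz j (by simp [hj]))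

-- rotation reindexing
theorem range_shift_rotate (n t : Nat) :
    (List.range n).map (fun j => (j + t) % n) = (List.range n).rotate t := by
  apply List.ext_getElem
  · simp
  · intro i h1 h2
    simp [List.getElem_rotate]

theorem xsum_rotate (n t : Nat) (f : Nat → Int) :
    xsum (List.range n) (fun j => f ((j + t) % n)) = xsum (List.range n) f := by
  rw [← xsum_map (List.range n) (fun j => (j + t) % n) f, range_shift_rotate]
  exact xsum_perm _ _ (List.rotate_perm _ _) f

-- the shift-by-b XOR operator on a list: one pass of A's inner loop
def sxN (b : Nat) (xs : List Int) : List Int :=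
  (List.range xs.length).map (fun i =>
    PySem.Int.bxor (xs.getD i 0) (xs.getD ((i + b) % xs.length) 0))

theorem length_sxN (b : Nat) (xs : List Int) : (sxN b xs).length = xs.length := by simp [sxN]

theorem sxN_getD (b : Nat) (xs : List Int) (i : Nat) (h : i < xs.length) :
    (sxN b xs).getD i 0 =
      PySem.Int.bxor (xs.getD i 0) (xs.getD ((i + b) % xs.length) 0) := by
  unfold sxN; rw [PySem.List.getD_map_range _ _ _ _ h]

-- one pass of A's inner loop IS sxN (for a positive Int shift b)
theorem step_eq (b : Int) (hb : 0 < b) (n : Nat) (cur : List Int) (h : cur.length = n) :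
    (PySem.List.pyRange 0 (n : Int) 1).map (fun i =>
        PySem.Int.bxor (PySem.List.pyGetD cur i 0)
          (PySem.List.pyGetD cur (PySem.Int.mod (i + b) (n : Int)) 0))
      = sxN b.toNat cur := by
  subst h
  rw [PySem.List.pyRange_zero_natCast, List.map_map]
  unfold sxN
  apply List.map_congr_left
  intro i hi
  have hi' : i < cur.length := List.mem_range.mp hi
  have hbe : ((i : Int) + b) = ((i + b.toNat : Nat) : Int) := by push_cast; omega
  simp only [Function.comp_apply, hbe, PySem.Int.mod_natCast, PySem.List.pyGetD_natCast]

-- applying the shift-b step twice is one shift-2b step (the xor of the middle terms cancels)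
theorem sxN_sxN (b : Nat) (xs : List Int) : sxN b (sxN b xs) = sxN (2 * b) xs := by
  apply List.ext_getElem
  · simp [sxN]
  · intro i h1 h2
    have hn : i < xs.length := by simpa [length_sxN] using h2
    have hnpos : 0 < xs.length := by omega
    have hm : (i + b) % xs.length < xs.length := Nat.mod_lt _ hnpos
    rw [← List.getD_eq_getElem _ 0, ← List.getD_eq_getElem _ 0]
    rw [sxN_getD, sxN_getD _ _ _ hn]
    · rw [length_sxN, sxN_getD _ _ _ hn, sxN_getD _ _ _ hm]
      rw [Nat.mod_add_mod, pvBxor4]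
      have he : i + b + b = i + 2 * b := by ring
      rw [he]
    · rw [length_sxN]; exact hn

theorem iter_double (b : Nat) : ∀ (m : Nat) (y : List Int),
    (sxN (2 * b))^[m] y = (sxN b)^[2 * m] y := by
  intro m
  induction m with
  | zero => intro y; rfl
  | succ m ih =>
    intro y
    rw [Function.iterate_succ_apply, ih, ← sxN_sxN]
    have h2 : 2 * (m + 1) = 2 * m + 1 + 1 := by ring
    rw [h2, Function.iterate_succ_apply, Function.iterate_succ_apply]

-- sxN depends on its shift only modulo the list length
theorem sxN_mod (b : Nat) (xs : List Int) : sxN (b % xs.length) xs = sxN b xs := by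
  unfold sxN
  apply List.map_congr_left
  intro i _
  rw [Nat.add_mod_mod]

theorem iter_sxN_mod (b n : Nat) : ∀ (m : Nat) (y : List Int), y.length = n →
    (sxN (b % n))^[m] y = (sxN b)^[m] y := by
  intro m
  induction m with
  | zero => intro y _; rfl
  | succ m ih =>
    intro y hy
    rw [Function.iterate_succ_apply, Function.iterate_succ_apply,
      ih (sxN (b % n) y) (by rw [length_sxN, hy])]
    subst hy
    rw [sxN_mod]

-- invariant of A's doubling loop: with last row y and base b it computes c applications of sxN b
theorem go_eq (row : List Int) : ∀ (fuel : Nat) (c : Int), c.toNat ≤ fuel →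
    ∀ (pm : List (List Int)) (y : List Int) (b : Int), 0 < b → y.length = row.length →
    fxrGo row (pm ++ [y]) b c = (sxN b.toNat)^[c.toNat] y := by
  intro fuel
  induction fuel with
  | zero =>
    intro c hc pm y b hb hy
    have hc0 : ¬ 0 < c := by omega
    rw [fxrGo, dif_neg hc0, PySem.List.pyGetD_neg_one_append_singleton]
    have h0 : c.toNat = 0 := by omega
    rw [h0]; rfl
  | succ f ih =>
    intro c hc pm y b hb hy
    by_cases hc0 : 0 < c
    · rw [fxrGo, dif_pos hc0]
      simp only [PySem.List.pyGetD_neg_one_append_singleton,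
        PySem.Int.mod_eq_emod_of_pos (show (0:Int) < 2 by norm_num),
        PySem.Int.floordiv_eq_ediv_of_pos (show (0:Int) < 2 by norm_num)]
      have hdiv : (c / 2).toNat ≤ f := by omega
      have hby : 0 < b * 2 := by omega
      have hbt : (b * 2).toNat = 2 * b.toNat := by omega
      by_cases hpar : c % 2 = 1
      · rw [if_pos hpar, PySem.List.foldl_append_singleton_eq_map, List.nil_append,
            step_eq b hb row.length y hy]
        rw [ih (c / 2) hdiv (pm ++ [y]) (sxN b.toNat y) (b * 2) hby
              (by rw [length_sxN, hy])]
        rw [hbt, iter_double, ← Function.iterate_succ_apply]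
        congr 1
        omega
      · rw [if_neg hpar, ih (c / 2) hdiv pm y (b * 2) hby hy, hbt, iter_double]
        congr 1
        omega
    · rw [fxrGo, dif_neg hc0, PySem.List.pyGetD_neg_one_append_singleton]
      have h0 : c.toNat = 0 := by omega
      rw [h0]; rfl

-- applying a 0/1 mask m of shifts to row: entry i is the xor of row[(i+j)%n] over set j
def appM (m row : List Int) : List Int :=
  (List.range row.length).map (fun i =>
    xsum (List.range row.length) (fun j =>
      if m.getD j 0 ≠ 0 then row.getD ((i + j) % row.length) 0 else 0))

theorem length_appM (m row : List Int) : (appM m row).length = row.length := by simp [appM]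

theorem appM_getD (m row : List Int) (i : Nat) (h : i < row.length) :
    (appM m row).getD i 0 = xsum (List.range row.length) (fun j =>
      if m.getD j 0 ≠ 0 then row.getD ((i + j) % row.length) 0 else 0) := by
  unfold appM; rw [PySem.List.getD_map_range _ _ _ _ h]

def M01 (m : List Int) : Prop := ∀ x ∈ m, x = 0 ∨ x = 1

theorem M01_getD (m : List Int) (h : M01 m) (j : Nat) : m.getD j 0 = 0 ∨ m.getD j 0 = 1 := by
  by_cases hj : j < m.length
  · rw [List.getD_eq_getElem _ _ hj]; exact h _ (List.getElem_mem hj)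
  · left; rw [List.getD_eq_default _ _ (by omega)]

theorem M01_sxN (t : Nat) (m : List Int) (h : M01 m) : M01 (sxN t m) := by
  intro x hx
  unfold sxN at hx
  obtain ⟨i, hi, rfl⟩ := List.mem_map.mp hx
  rcases M01_getD m h i with h1 | h1 <;> rcases M01_getD m h ((i + t) % m.length) with h2 | h2 <;>
    rw [h1, h2] <;> simp [PySem.Int.bxor_self, PySem.Int.bxor_zero, pvZero_bxor]

-- exchange law: applying the backwards-shift-t updated mask = forward shift-s step after applying m
theorem appM_sxN (row m : List Int) (s t : Nat)
    (hm : m.length = row.length) (h01 : M01 m) (hn : 0 < row.length)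
    (hst : (s + t) % row.length = 0) :
    appM (sxN t m) row = sxN s (appM m row) := by
  apply List.ext_getElem
  · rw [length_sxN, length_appM, length_appM]
  · intro i h1 h2
    have hi : i < row.length := by rwa [length_appM] at h1
    rw [← List.getD_eq_getElem _ 0, ← List.getD_eq_getElem _ 0]
    rw [appM_getD _ _ _ hi, sxN_getD _ _ _ (by rwa [length_appM])]
    rw [length_appM, appM_getD _ _ _ hi, appM_getD _ _ _ (Nat.mod_lt _ hn)]
    have hstep : ∀ j ∈ List.range row.length,
        (if (sxN t m).getD j 0 ≠ 0 then row.getD ((i + j) % row.length) 0 else 0)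
        = PySem.Int.bxor
            (if m.getD j 0 ≠ 0 then row.getD ((i + j) % row.length) 0 else 0)
            (if m.getD ((j + t) % row.length) 0 ≠ 0 then row.getD ((i + j) % row.length) 0 else 0) := by
      intro j hj
      have hjn : j < row.length := List.mem_range.mp hj
      rw [sxN_getD _ _ _ (by omega : j < m.length), hm]
      rcases M01_getD m h01 j with ha | ha <;>
        rcases M01_getD m h01 ((j + t) % row.length) with hb | hb <;>
          rw [ha, hb] <;>
          simp [PySem.Int.bxor_self, PySem.Int.bxor_zero, pvZero_bxor]
    rw [xsum_congr _ _ _ hstep, xsum_split]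
    congr 1
    have hidx : ∀ j : Nat, ((i + s) % row.length + (j + t) % row.length) % row.length
        = (i + j) % row.length := by
      intro j
      rw [Nat.mod_add_mod, Nat.add_mod_mod]
      have he : i + s + (j + t) = i + j + (s + t) := by ring
      rw [he, Nat.add_mod (i + j) (s + t), hst, Nat.add_zero]
      simp
    have hG : ∀ j ∈ List.range row.length,
        (if m.getD ((j + t) % row.length) 0 ≠ 0 then row.getD ((i + j) % row.length) 0 else 0)
        = (fun k => if m.getD k 0 ≠ 0 then
            row.getD (((i + s) % row.length + k) % row.length) 0 else 0) ((j + t) % row.length) := by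
      intro j _
      simp only
      rw [hidx j]
    rw [xsum_congr _ _ _ hG]
    exact xsum_rotate row.length t (fun k => if m.getD k 0 ≠ 0 then
      row.getD (((i + s) % row.length + k) % row.length) 0 else 0)

-- one pass of B's mask update IS sxN (n - s) on the mask
theorem maskstep_eq (s : Int) (n : Nat) (hs0 : 0 ≤ s) (hsn : s < n) (m : List Int)
    (hm : m.length = n) :
    (PySem.List.pyRange 0 (n : Int) 1).map (fun j =>
        PySem.Int.bxor (PySem.List.pyGetD m j 0)
          (PySem.List.pyGetD m (PySem.Int.mod (j - s) (n : Int)) 0))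
      = sxN (n - s.toNat) m := by
  subst hm
  rw [PySem.List.pyRange_zero_natCast, List.map_map]
  unfold sxN
  apply List.map_congr_left
  intro j hj
  have hj' : j < m.length := List.mem_range.mp hj
  have hbe : ((j : Int) - s) = ((j + (m.length - s.toNat) : Nat) : Int) - (m.length : Int) := by
    push_cast; omega
  have hsub : (((j + (m.length - s.toNat) : Nat) : Int) - (m.length : Int)) % (m.length : Int)
      = ((j + (m.length - s.toNat) : Nat) : Int) % (m.length : Int) := Int.sub_emod_right _ _
  simp only [Function.comp_apply, PySem.List.pyGetD_natCast, hbe,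
    PySem.Int.mod_eq_emod_of_pos (show (0:Int) < (m.length : Int) by omega), hsub]
  rw [← PySem.Int.mod_eq_emod_of_pos (show (0:Int) < (m.length : Int) by omega),
    PySem.Int.mod_natCast, PySem.List.pyGetD_natCast]

-- invariant of B's mask loop, read through appM
theorem altgo_eq (row : List Int) (hn : 0 < row.length) : ∀ (fuel : Nat) (d : Int),
    d.toNat ≤ fuel → ∀ (m : List Int) (s : Int), 0 ≤ s → s < row.length →
    m.length = row.length → M01 m →
    appM (fxrAltGo row.length m s d) row = (sxN s.toNat)^[d.toNat] (appM m row) := by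
  intro fuel
  induction fuel with
  | zero =>
    intro d hd m s _ _ _ _
    have hd0 : ¬ 0 < d := by omega
    rw [fxrAltGo, dif_neg hd0]
    have h0 : d.toNat = 0 := by omega
    rw [h0]; rfl
  | succ f ih =>
    intro d hd m s hs0 hsn hm h01
    by_cases hd0 : 0 < d
    · rw [fxrAltGo, dif_pos hd0]
      simp only [PySem.Int.mod_eq_emod_of_pos (show (0:Int) < 2 by norm_num) (a := d),
        PySem.Int.floordiv_eq_ediv_of_pos (show (0:Int) < 2 by norm_num)]
      have hnz : (0:Int) < (row.length : Int) := by exact_mod_cast hn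
      have hdiv : (d / 2).toNat ≤ f := by omega
      have hs0' : 0 ≤ PySem.Int.mod (s * 2) (row.length : Int) :=
        PySem.Int.mod_nonneg _ hnz
      have hsn' : PySem.Int.mod (s * 2) (row.length : Int) < (row.length : Int) :=
        PySem.Int.mod_lt _ hnz
      have hst : (PySem.Int.mod (s * 2) (row.length : Int)).toNat = (2 * s.toNat) % row.length := by
        rw [show (s * 2 : Int) = ((2 * s.toNat : Nat) : Int) by push_cast; omega,
          PySem.Int.mod_natCast, Int.toNat_natCast]
      have hcancel : (s.toNat + (row.length - s.toNat)) % row.length = 0 := by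
        have hle : s.toNat ≤ row.length := by omega
        have : s.toNat + (row.length - s.toNat) = row.length := by omega
        rw [this, Nat.mod_self]
      by_cases hpar : d % 2 = 1
      · rw [if_pos hpar, maskstep_eq s row.length hs0 (by exact_mod_cast hsn) m hm]
        rw [ih (d / 2) hdiv (sxN (row.length - s.toNat) m) (PySem.Int.mod (s * 2) (row.length : Int))
              hs0' hsn' (by rw [length_sxN, hm]) (M01_sxN _ _ h01)]
        rw [hst, iter_sxN_mod _ _ _ _ (by rw [length_appM]), iter_double]
        rw [appM_sxN row m s.toNat (row.length - s.toNat) hm h01 hn hcancel]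
        rw [← Function.iterate_succ_apply]
        congr 1
        omega
      · rw [if_neg hpar, ih (d / 2) hdiv m (PySem.Int.mod (s * 2) (row.length : Int))
              hs0' hsn' hm h01]
        rw [hst, iter_sxN_mod _ _ _ _ (by rw [length_appM]), iter_double]
        congr 1
        omega
    · rw [fxrAltGo, dif_neg hd0]
      have h0 : d.toNat = 0 := by omega
      rw [h0]; rfl

-- the initial mask is the identity operator
theorem appM_e0 (row : List Int) (hn : 0 < row.length) :
    appM ((1 : Int) :: List.replicate (row.length - 1) 0) row = row := by
  apply List.ext_getElem
  · rw [length_appM]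
  · intro i h1 h2
    have hi : i < row.length := by rwa [length_appM] at h1
    rw [← List.getD_eq_getElem _ 0, appM_getD _ _ _ hi]
    have hz : ∀ j ∈ List.range row.length, j ≠ 0 →
        (if ((1 : Int) :: List.replicate (row.length - 1) 0).getD j 0 ≠ 0 then
          row.getD ((i + j) % row.length) 0 else 0) = 0 := by
      intro j _ hj0
      obtain ⟨k, rfl⟩ := Nat.exists_eq_succ_of_ne_zero hj0
      have : ((1 : Int) :: List.replicate (row.length - 1) 0).getD (k + 1) 0 = 0 := by
        show (List.replicate (row.length - 1) (0 : Int)).getD k 0 = 0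
        by_cases hk : k < row.length - 1
        · rw [List.getD_eq_getElem _ _ (by simpa using hk), List.getElem_replicate]
        · rw [List.getD_eq_default _ _ (by simpa using hk)]
      rw [this]
      simp
    rw [xsum_single _ 0 (List.range row.length) (List.nodup_range)
          (List.mem_range.mpr hn) hz]
    simp [Nat.mod_eq_of_lt hi, List.getElem?_eq_getElem hi]

-- B's final application of the mask is appM
theorem apply_eq (mask row : List Int) :
    (PySem.List.pyRange 0 (row.length : Int) 1).map (fun i =>
        ((PySem.List.pyRange 0 (row.length : Int) 1).filter
            (fun j => PySem.List.pyGetD mask j 0 != 0)).foldl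
          (fun acc j => PySem.Int.bxor acc
            (PySem.List.pyGetD row (PySem.Int.mod (i + j) (row.length : Int)) 0)) 0)
      = appM mask row := by
  rw [PySem.List.pyRange_zero_natCast, List.filter_map, List.map_map]
  unfold appM
  apply List.map_congr_left
  intro i hi
  have hi' : i < row.length := List.mem_range.mp hi
  rw [Function.comp_apply, List.foldl_map]
  have hfold : ∀ (l : List Nat),
      l.foldl (fun acc (j : Nat) => PySem.Int.bxor acc
          (PySem.List.pyGetD row (PySem.Int.mod ((i : Int) + (j : Int)) (row.length : Int)) 0)) 0
        = xsum l (fun j => row.getD ((i + j) % row.length) 0) := by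
    intro l
    unfold xsum
    apply List.foldl_ext
    intro acc j _
    rw [show ((i : Int) + (j : Int)) = ((i + j : Nat) : Int) by push_cast; ring,
      PySem.Int.mod_natCast, PySem.List.pyGetD_natCast]
  rw [hfold, xsum_filter]
  apply xsum_congr
  intro j _
  simp only [Function.comp_apply, PySem.List.pyGetD_natCast, bne_iff_ne, ne_eq]

-- ===== VERDICT (by name: the statement is the Claim_ definition above) =====
theorem fast_xor_row_spec : Claim_equal_fast_xor_row := by
  intro row depth _
  unfold Spec_fast_xor_row
  have hA : fast_xor_row row depth = (sxN 1)^[depth.toNat] row := by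
    have h := go_eq row depth.toNat depth le_rfl [] row 1 (by norm_num) rfl
    simpa [fast_xor_row] using h
  by_cases hn0 : row.length = 0
  · have hrow : row = [] := List.length_eq_zero_iff.mp hn0
    subst hrow
    rw [hA, Function.iterate_fixed rfl]
    simp [fast_xor_row_alt]
  · have hn : 0 < row.length := by omega
    rw [hA]
    show _ = fast_xor_row_alt row depth
    rw [fast_xor_row_alt]
    simp only [if_neg hn0]
    rw [apply_eq]
    have he0len : ((1 : Int) :: List.replicate (row.length - 1) 0).length = row.length := by
      simp; omega
    have h01 : M01 ((1 : Int) :: List.replicate (row.length - 1) 0) := by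
      intro x hx
      rcases List.mem_cons.mp hx with rfl | hx'
      · right; rfl
      · left; exact List.eq_of_mem_replicate hx'
    have hs0 : (0:Int) ≤ PySem.Int.mod 1 (row.length : Int) :=
      PySem.Int.mod_nonneg _ (by exact_mod_cast hn)
    have hsn : PySem.Int.mod 1 (row.length : Int) < row.length := by
      have := PySem.Int.mod_lt (a := 1) (b := (row.length : Int)) (by exact_mod_cast hn)
      exact this
    rw [altgo_eq row hn depth.toNat depth le_rfl _ _ hs0 hsn he0len h01]
    rw [appM_e0 row hn]
    have hst : (PySem.Int.mod 1 (row.length : Int)).toNat = 1 % row.length := by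
      rw [show (1 : Int) = ((1 : Nat) : Int) by norm_num, PySem.Int.mod_natCast,
        Int.toNat_natCast]
    rw [hst, iter_sxN_mod 1 row.length depth.toNat row rfl]
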